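-- pv_equiv track=rewrite | github.com/shimjaeman/CodingTest | 프로그래머스/unrated/135808. 과일 장수/과일 장수.py | solution
-- ===== SOURCE A (Python) =====
-- def solution(k, m, score):
--     # 상태에 따라 1점부터 k점까지의 점수로 분류
--     # 한 상자에 사과를 m개씩 담아 포장
--     # 가장 낮은 점수가 p점인 경우, 사과 한 상자의 가격은 p * m \
--     # 얻을 수 있는 최대 이익을 계산 (그리드?)
--     # 상자 단위로만 판매하며, 남는 사과는 패기
--     # 이익이 발생하지 않는 경우에는 0을 return
--     # 정렬 => m개 묶기
--     score.sort(reverse=True)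
--     answer = [[] for i in range((len(score) // m)+1)]
--     box_cnt = 0
--     movbox = 0
--     for i in score:
--         if box_cnt == m:
--             box_cnt = 0
--             movbox +=1
--
--         if box_cnt <=m :
--             answer[movbox].append(i)
--             box_cnt += 1
--
--     sort_answer = [sorted(i)[0] * m for i in answer if len(i) == m]
--     return sum(sort_answer)
-- ===== SOURCE B (Python) =====
-- def solution(k, m, score):
--     # Sort descending in place (same mutation as A), then sum the minimum of each
--     # full box directly: it sits at stride positions m-1, 2m-1, ... No group lists,
--     # no per-box inner sort.
--     score.sort(reverse=True)
--     return m * sum(score[i] for i in range(m - 1, len(score), m))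
-- ===== Notes on version B (the rewrite author's own statement) =====
-- stated objective: simpler
-- what changed: Replaces the group-list building (pre-allocated box lists, box counters, per-box inner sort, filter by length) with a single stride sum over the descending-sorted list: the minimum of each full box is the element at index m-1, 2m-1, ...
import Mathlib
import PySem

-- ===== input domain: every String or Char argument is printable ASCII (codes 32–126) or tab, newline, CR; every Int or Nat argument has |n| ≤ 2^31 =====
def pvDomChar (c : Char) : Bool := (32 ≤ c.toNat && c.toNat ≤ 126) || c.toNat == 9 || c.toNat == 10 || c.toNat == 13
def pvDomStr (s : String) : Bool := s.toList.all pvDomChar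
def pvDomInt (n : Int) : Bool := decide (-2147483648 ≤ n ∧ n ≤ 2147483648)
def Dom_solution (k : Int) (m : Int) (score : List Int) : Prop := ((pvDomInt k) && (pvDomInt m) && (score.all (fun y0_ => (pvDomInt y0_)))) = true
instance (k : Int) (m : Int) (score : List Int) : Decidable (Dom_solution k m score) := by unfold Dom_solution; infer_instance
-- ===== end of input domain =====

-- B sorts descending in place like A and sums the minimum of each full box directly
-- (it sits at stride positions m-1, 2m-1, …), dropping A's group lists and per-box sorts.
-- Equivalence of RETURN values; both mutate `score` identically (in-place descending sort).

-- ===== PORT A =====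
-- loop body of A's `for i in score`, extracted as a named helper (state: answer, box_cnt, movbox)
def stepA (m : Int) (st : List (List Int) × Int × Int) (i : Int) : List (List Int) × Int × Int :=
  let bq := if st.2.1 = m then ((0:Int), st.2.2 + 1) else (st.2.1, st.2.2)
  if bq.1 ≤ m then
    (st.1.set bq.2.toNat ((st.1.getD bq.2.toNat []) ++ [i]), bq.1 + 1, bq.2)
  else (st.1, bq.1, bq.2)

def solution (k : Int) (m : Int) (score : List Int) : Int :=
  let s := PySem.List.sorted score (fun x => x) true
  let answer : List (List Int) :=
    (PySem.List.pyRange 0 (PySem.Int.floordiv (s.length : Int) m + 1) 1).map (fun _ => ([] : List Int))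
  let st := s.foldl (stepA m) (answer, 0, 0)
  ((st.1.filter (fun g => (g.length : Int) = m)).map
      (fun g => ((PySem.List.pyGet? (PySem.List.sorted g (fun x => x) false) 0).getD 0) * m)).sum

-- ===== PORT B =====
def solution_alt (k : Int) (m : Int) (score : List Int) : Int :=
  let s := PySem.List.sorted score (fun x => x) true
  m * ((PySem.List.pyRange (m - 1) (s.length : Int) m).map
        (fun i => (PySem.List.pyGet? s i).getD 0)).sum

-- ===== PRECONDITION & SPEC =====
-- Pre_ excludes exactly m = 0, where A raises ZeroDivisionError (len(score) // m)
-- and B raises ValueError (range step 0).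
def Pre_solution (k : Int) (m : Int) (score : List Int) : Prop := m ≠ 0
instance (k : Int) (m : Int) (score : List Int) : Decidable (Pre_solution k m score) := by unfold Pre_solution; infer_instance
def pvWitness_solution : Int × Int × List Int := (3, 2, [1, 2, 3, 4])

def Spec_solution (k : Int) (m : Int) (score : List Int) (out : Int) : Prop := out = solution_alt k m score
instance (k : Int) (m : Int) (score : List Int) (out : Int) : Decidable (Spec_solution k m score out) := by unfold Spec_solution; infer_instance

-- ===== CLAIM (what is proved, stated in full; the proofs are below) =====
def Claim_equal_solution : Prop := ∀ (k : Int) (m : Int) (score : List Int), Dom_solution k m score → Pre_solution k m score → Spec_solution k m score (solution k m score)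

-- ===== LEMMAS AND PROOFS =====

-- the full boxes of m elements, in order (proof-only helper)
def fullChunks (M : Nat) (s : List Int) : List (List Int) :=
  if h : M ≤ s.length ∧ 1 ≤ M then s.take M :: fullChunks M (s.drop M) else []
termination_by s.length
decreasing_by
  simp only [List.length_drop]; omega

lemma fullChunks_nil (M : Nat) (s : List Int) (h : s.length < M) : fullChunks M s = [] := by
  rw [fullChunks]; rw [dif_neg]; omega

lemma fullChunks_cons (M : Nat) (s : List Int) (h1 : M ≤ s.length) (h2 : 1 ≤ M) :
    fullChunks M s = s.take M :: fullChunks M (s.drop M) := by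
  rw [fullChunks]; simp [h1, h2]

lemma fullChunks_length_mem_fuel (M : Nat) : ∀ (n : Nat) (s : List Int), s.length ≤ n →
    ∀ c ∈ fullChunks M s, c.length = M := by
  intro n
  induction n with
  | zero =>
      intro s hs c hc
      have h0 : s.length = 0 := by omega
      rcases List.length_eq_zero_iff.mp h0 with rfl
      rw [fullChunks, dif_neg (by simp only [List.length_nil]; omega)] at hc
      simp at hc
  | succ n ih =>
      intro s hs c hc
      by_cases h : M ≤ s.length ∧ 1 ≤ M
      · rw [fullChunks_cons M s h.1 h.2] at hc
        rcases List.mem_cons.mp hc with rfl | hc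
        · simp [List.length_take]; omega
        · exact ih (s.drop M) (by simp; omega) c hc
      · rw [fullChunks, dif_neg h] at hc; simp at hc

lemma fullChunks_length_mem (M : Nat) (s : List Int) (c : List Int)
    (hc : c ∈ fullChunks M s) : c.length = M :=
  fullChunks_length_mem_fuel M s.length s le_rfl c hc

lemma fullChunks_sublist_fuel (M : Nat) : ∀ (n : Nat) (s : List Int), s.length ≤ n →
    ∀ c ∈ fullChunks M s, c.Sublist s := by
  intro n
  induction n with
  | zero =>
      intro s hs c hc
      have h0 : s.length = 0 := by omega
      rcases List.length_eq_zero_iff.mp h0 with rfl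
      by_cases hM : M ≤ 0 ∧ 1 ≤ M
      · omega
      · rw [fullChunks, dif_neg (by simpa using hM)] at hc; simp at hc
  | succ n ih =>
      intro s hs c hc
      by_cases h : M ≤ s.length ∧ 1 ≤ M
      · rw [fullChunks_cons M s h.1 h.2] at hc
        rcases List.mem_cons.mp hc with rfl | hc
        · exact List.take_sublist M s
        · exact (ih (s.drop M) (by simp; omega) c hc).trans (List.drop_sublist M s)
      · rw [fullChunks, dif_neg h] at hc; simp at hc

lemma fullChunks_sublist (M : Nat) (s : List Int) (c : List Int)
    (hc : c ∈ fullChunks M s) : c.Sublist s :=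
  fullChunks_sublist_fuel M s.length s le_rfl c hc

-- m < 0: A's loop never fires
lemma stepA_skip (m : Int) (hm : m < 0) (a : List (List Int)) (q : Int) (s : List Int) :
    s.foldl (stepA m) (a, 0, q) = (a, 0, q) := by
  induction s with
  | nil => rfl
  | cons x t ih =>
      have h1 : ¬ ((0:Int) = m) := by omega
      have h2 : ¬ ((0:Int) ≤ m) := by omega
      simp only [List.foldl_cons, stepA, h1, if_false, h2, ite_false]
      exact ih

-- filling within one box: b items already in box q, c fits entirely
lemma loop_fill (m : Int) (c : List Int) (a : List (List Int)) (b : Int) (q : Nat)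
    (hb : 0 ≤ b) (hfit : b + c.length ≤ m) (hq : q < a.length) :
    c.foldl (stepA m) (a, b, (q : Int)) =
      (a.set q ((a.getD q []) ++ c), b + c.length, (q : Int)) := by
  induction c generalizing a b with
  | nil =>
      simp only [List.foldl_nil, List.length_nil, Nat.cast_zero, add_zero, List.append_nil]
      rw [List.getD_eq_getElem _ _ hq, List.set_getElem_self]
  | cons x c' ih =>
      have hne : ¬ (b = m) := by simp at hfit; omega
      have hle : b ≤ m := by simp at hfit; omega
      simp only [List.foldl_cons, stepA, hne, if_false, if_pos hle, Int.toNat_natCast]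
      rw [ih (a.set q (a.getD q [] ++ [x])) (b+1) (by omega)
            (by simp at hfit ⊢; omega) (by simpa using hq)]
      have hgd : (a.set q (a.getD q [] ++ [x])).getD q [] = a.getD q [] ++ [x] := by
        simp [List.getD_eq_getElem?_getD, hq]
      rw [hgd, List.set_set]
      refine Prod.ext ?_ (Prod.ext ?_ rfl)
      · simp
      · simp; push_cast; ring

-- a full box pending: the next element triggers the reset
lemma stepA_reset (m : Int) (hm : 1 ≤ m) (a : List (List Int)) (q : Int) (x : Int) (r : List Int) :
    (x :: r).foldl (stepA m) (a, m, q) = (x :: r).foldl (stepA m) (a, 0, q + 1) := by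
  have h1 : ¬ ((0:Int) = m) := by omega
  have h2 : (0:Int) ≤ m := by omega
  simp [stepA, h1, h2]

-- the main loop invariant: starting with built chunks `pre` and t+1 empty slots,
-- the loop fills the full chunks of s and leaves the remainder in the next slot
lemma loop_main (m : Int) (M : Nat) (hm : 1 ≤ m) (hM : m = (M : Int)) :
    ∀ (n : Nat) (s : List Int) (pre : List (List Int)) (t : Nat),
    s.length ≤ n → s.length / M ≤ t →
    (s.foldl (stepA m) (pre ++ List.replicate (t+1) [], 0, (pre.length : Int))).1 =
      pre ++ fullChunks M s ++ [s.drop (M * (s.length / M))] ++ List.replicate (t - s.length / M) [] := by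
  have hM1 : 1 ≤ M := by omega
  intro n
  induction n with
  | zero =>
      intro s pre t hn ht
      have h0 : s.length = 0 := by omega
      rcases List.length_eq_zero_iff.mp h0 with rfl
      rw [fullChunks_nil M [] (by simpa using hM1)]
      simp [List.replicate_succ]
  | succ n ih =>
      intro s pre t hn ht
      by_cases hlt : s.length < M
      · -- everything fits in the current box
        have hq0 : s.length / M = 0 := Nat.div_eq_of_lt hlt
        rw [loop_fill m s (pre ++ List.replicate (t+1) []) 0 pre.length le_rfl
              (by rw [hM]; push_cast; omega) (by simp)]
        rw [fullChunks_nil M s hlt, hq0]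
        simp [List.replicate_succ, List.getD_eq_getElem?_getD]
      · -- a full box, then recurse on the rest
        push_neg at hlt
        conv_lhs => rw [← List.take_append_drop M s, List.foldl_append]
        rw [loop_fill m (s.take M) (pre ++ List.replicate (t+1) []) 0 pre.length le_rfl
              (by rw [hM]; simp [List.length_take]) (by simp)]
        have hsetfill : (pre ++ List.replicate (t+1) ([] : List Int)).set pre.length
            ((pre ++ List.replicate (t+1) ([] : List Int)).getD pre.length [] ++ s.take M)
            = pre ++ s.take M :: List.replicate t [] := by
          simp [List.replicate_succ, List.getD_eq_getElem?_getD]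
        rw [hsetfill]
        have hmid : (0 : Int) + ↑(s.take M).length = m := by
          rw [hM]; simp [List.length_take]; omega
        rw [hmid]
        have hq : s.length / M = (s.drop M).length / M + 1 := by
          have : s.length = (s.drop M).length + M := by simp; omega
          rw [this, Nat.add_div_right _ (by omega)]
        cases hrest : s.drop M with
        | nil =>
            have hlen : s.length = M := by
              have := congrArg List.length hrest; simp at this; omega
            simp only [List.foldl_nil]
            rw [fullChunks_cons M s hlt hM1, hrest, fullChunks_nil M [] (by simpa using hM1)]
            rw [hq, hrest]
            have ht1 : 1 ≤ t := by rw [hq, hrest] at ht; simpa using ht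
            simp only [List.length_nil, Nat.zero_div, Nat.mul_one]
            rw [List.drop_eq_nil_iff.mpr (by omega) ]
            obtain ⟨t', rfl⟩ : ∃ t', t = t' + 1 := ⟨t - 1, by omega⟩
            simp [List.replicate_succ]
        | cons y r =>
            rw [stepA_reset m hm _ _ y r]
            have hcast : (pre.length : Int) + 1 = ((pre ++ [s.take M]).length : Int) := by
              simp
            have hpre : pre ++ s.take M :: List.replicate t ([] : List Int)
                = (pre ++ [s.take M]) ++ List.replicate ((t-1)+1) ([] : List Int) := by
              have ht1 : 1 ≤ t := by rw [hq] at ht; exact le_trans (Nat.le_add_left 1 _) ht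
              obtain ⟨t', rfl⟩ : ∃ t', t = t' + 1 := ⟨t - 1, by omega⟩
              simp
            rw [hcast, hpre, ← hrest]
            rw [ih (s.drop M) (pre ++ [s.take M]) (t-1) (by simp [List.length_take]; omega) (by omega)]
            rw [fullChunks_cons M s hlt hM1, hq]
            have hdrop : (s.drop M).drop (M * ((s.drop M).length / M)) =
                s.drop (M * ((s.drop M).length / M + 1)) := by
              rw [List.drop_drop]; ring_nf
            have htt : t - 1 - (s.drop M).length / M = t - ((s.drop M).length / M + 1) := by
              omega
            rw [hdrop, htt]
            simp

-- in a descending list the last element is a lower bound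
lemma getLast?_le_mem (c : List Int) (hd : c.Pairwise (fun a b => b ≤ a))
    (y : Int) (hy : y ∈ c) : c.getLast?.getD 0 ≤ y := by
  rcases List.mem_iff_getElem.mp hy with ⟨i, hi, rfl⟩
  have hne : 0 < c.length := by omega
  rw [List.getLast?_eq_getElem?, List.getElem?_eq_getElem (by omega)]
  simp only [Option.getD_some]
  rcases Nat.lt_or_ge i (c.length - 1) with h | h
  · exact List.pairwise_iff_getElem.mp hd i (c.length - 1) hi (by omega) h
  · have : i = c.length - 1 := by omega
    subst this; exact le_refl _

-- the first element of sorted(c) is c's minimum = c's last element, for descending c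
lemma minHead (c : List Int) (hne : c ≠ [])
    (hd : c.Pairwise (fun a b => b ≤ a)) :
    (PySem.List.pyGet? (PySem.List.sorted c (fun x => x) false) 0).getD 0 = c.getLast?.getD 0 := by
  have hlen := PySem.List.length_sorted c (fun x => x) false
  have hsne : PySem.List.sorted c (fun x => x) false ≠ [] := by
    intro h; apply hne; rw [h] at hlen
    exact (List.length_eq_zero_iff.mp hlen.symm)
  cases hs : PySem.List.sorted c (fun x => x) false with
  | nil => exact absurd hs hsne
  | cons x t =>
      rw [show (0:Int) = ((0:Nat):Int) by simp, PySem.List.pyGet?_natCast]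
      have hgl : c.getLast?.getD 0 ∈ c := by
        cases hc : c.getLast? with
        | none => exact absurd (List.getLast?_eq_none_iff.mp hc) hne
        | some v => simpa [hc] using List.mem_of_getLast? hc
      have h1 : x ≤ c.getLast?.getD 0 := PySem.List.key_head_sorted_le c (fun x => x) hs _ hgl
      have h2 : c.getLast?.getD 0 ≤ x := by
        have hx : x ∈ c := by
          have := (PySem.List.sorted_perm c (fun x => x) false).mem_iff (a := x)
          rw [hs] at this; exact this.mp (by simp)
        exact getLast?_le_mem c hd x hx
      simp [le_antisymm h1 h2]

-- the stride range m-1, 2m-1, … has exactly one index per full chunk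
lemma strideRange (m : Int) (M : Nat) (hm : 1 ≤ m) (hM : m = (M : Int)) (L : Nat) :
    PySem.List.pyRange (m - 1) (L : Int) m =
      (List.range (L / M)).map (fun (k : Nat) => (m - 1) + m * (k : Int)) := by
  have hcount : (if m - 1 < (L:Int) then (((L:Int) - (m - 1) + m - 1) / m).toNat else 0) = L / M := by
    split_ifs with h
    · have he : ((L:Int) - (m - 1) + m - 1) = (L : Int) := by ring
      rw [he, hM, ← Int.natCast_div, Int.toNat_natCast]
    · have hL : L < M := by omega
      rw [Nat.div_eq_of_lt hL]
  rw [PySem.List.pyRange_of_pos _ _ (by omega), hcount]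

-- B's stride positions read exactly the last elements of the full chunks
lemma strideMap (m : Int) (M : Nat) (hm : 1 ≤ m) (hM : m = (M : Int)) :
    ∀ (n : Nat) (s : List Int), s.length ≤ n →
    (PySem.List.pyRange (m - 1) (s.length : Int) m).map (fun i => (PySem.List.pyGet? s i).getD 0) =
      (fullChunks M s).map (fun c => c.getLast?.getD 0) := by
  have hM1 : 1 ≤ M := by omega
  intro n
  induction n with
  | zero =>
      intro s hn
      have h0 : s.length = 0 := by omega
      rw [strideRange m M hm hM, h0, Nat.zero_div, fullChunks_nil M s (by omega)]
      simp
  | succ n ih =>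
      intro s hn
      rw [strideRange m M hm hM]
      by_cases hlt : s.length < M
      · rw [Nat.div_eq_of_lt hlt, fullChunks_nil M s hlt]; simp
      · push_neg at hlt
        have hq : s.length / M = (s.drop M).length / M + 1 := by
          have h1 : s.length = (s.drop M).length + M := by simp; omega
          rw [h1, Nat.add_div_right _ (by omega)]
        rw [hq, fullChunks_cons M s hlt hM1, List.range_succ_eq_map]
        simp only [List.map_cons, List.map_map]
        refine congrArg₂ (· :: ·) ?_ ?_
        · -- head: s[m-1] is the last element of the first chunk
          simp only [Function.comp_apply, Nat.cast_zero, mul_zero, add_zero]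
          rw [show m - 1 = ((M - 1 : Nat) : Int) by
                rw [hM]; push_cast [Nat.cast_sub hM1]; ring,
              PySem.List.pyGet?_natCast]
          rw [List.getLast?_eq_getElem?, List.length_take]
          rw [show min M s.length = M by omega]
          rw [List.getElem?_take_of_lt (by omega)]
        · -- tail: shift every later index into the dropped list
          rw [← ih (s.drop M) (by simp; omega), strideRange m M hm hM, List.map_map]
          apply List.map_congr_left
          intro k _
          simp only [Function.comp_apply]
          rw [show m - 1 + m * ((Nat.succ k : Nat) : Int) = ((M + ((M - 1) + M * k) : Nat) : Int) by
                rw [hM]; push_cast [Nat.cast_sub hM1]; ring,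
            show (m - 1) + m * ((k:Nat):Int) = (((M - 1) + M * k : Nat) : Int) by
                rw [hM]; push_cast [Nat.cast_sub hM1]; ring,
            PySem.List.pyGet?_natCast, PySem.List.pyGet?_natCast, List.getElem?_drop]

-- ===== VERDICT (by name: the statement is the Claim_ definition above) =====
-- the pre-allocated answer list is a list of empty boxes
lemma answer0_eq (L : Nat) :
    (PySem.List.pyRange 0 ((L : Int) + 1) 1).map (fun _ => ([] : List Int)) =
      List.replicate (L + 1) [] := by
  rw [PySem.List.pyRange_one, List.map_map,
    show ((L:Int) + 1 - 0).toNat = L + 1 by omega]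
  exact List.map_const'.trans (by simp)

-- ===== VERDICT (by name: the statement is the Claim_ definition above) =====
theorem solution_spec : Claim_equal_solution := by
  unfold Claim_equal_solution
  intro k m score _ hpre
  unfold Spec_solution solution solution_alt
  simp only []
  by_cases hm : 1 ≤ m
  · -- m ≥ 1: both sides sum the minima of the full boxes
    have hM : m = (m.toNat : Int) := (Int.toNat_of_nonneg (by omega)).symm
    set M := m.toNat with hMdef
    have hM1 : 1 ≤ M := by omega
    set s := PySem.List.sorted score (fun x => x) true with hs
    have hfd : PySem.Int.floordiv (s.length : Int) m = ((s.length / M : Nat) : Int) := by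
      rw [hM]; exact_mod_cast PySem.Int.floordiv_natCast s.length M
    rw [hfd, answer0_eq]
    have hloop := loop_main m M hm hM s.length s [] (s.length / M) le_rfl le_rfl
    simp only [List.nil_append, List.length_nil, Nat.cast_zero, Nat.sub_self,
      List.replicate_zero, List.append_nil] at hloop
    rw [hloop]
    set q := s.length / M with hqdef
    set rem := s.drop (M * q) with hremdef
    have hrem : rem.length < M := by
      have hlen : rem.length = s.length - M * q := by simp [hremdef]
      rw [hlen, hqdef, ← Nat.mod_def]
      exact Nat.mod_lt _ (by omega)
    have hfilter : (fullChunks M s ++ [rem]).filter (fun g => decide ((g.length : Int) = m)) =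
        fullChunks M s := by
      rw [List.filter_append]
      have h1 : (fullChunks M s).filter (fun g => decide ((g.length : Int) = m)) = fullChunks M s := by
        apply List.filter_eq_self.mpr
        intro c hc
        simp [fullChunks_length_mem M s c hc, hM]
      have h2 : [rem].filter (fun g => decide ((g.length : Int) = m)) = [] := by
        simp only [List.filter_cons, List.filter_nil]
        rw [if_neg]
        simp only [decide_eq_true_eq]
        rw [hM]
        intro hcontra
        omega
      rw [h1, h2, List.append_nil]
    rw [hfilter]
    have hmap : (fullChunks M s).map
        (fun g => ((PySem.List.pyGet? (PySem.List.sorted g (fun x => x) false) 0).getD 0) * m) =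
        (fullChunks M s).map (fun c => c.getLast?.getD 0 * m) := by
      apply List.map_congr_left
      intro c hc
      have hlen := fullChunks_length_mem M s c hc
      have hne : c ≠ [] := by
        intro h; rw [h] at hlen; simp at hlen; omega
      have hdesc : c.Pairwise (fun a b => b ≤ a) :=
        (PySem.List.sorted_pairwise_rev score (fun x => x)).sublist
          (fullChunks_sublist M s c hc)
      rw [minHead c hne hdesc]
    rw [hmap, List.sum_map_mul_right, strideMap m M hm hM s.length s le_rfl, mul_comm]
  · -- m < 0: A builds no full box, B's stride range is empty
    have hneg : m < 0 := by
      unfold Pre_solution at hpre; omega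
    rw [stepA_skip m hneg _ 0 _]
    have hfilter : ((PySem.List.pyRange 0 (PySem.Int.floordiv (↑(PySem.List.sorted score (fun x => x) true).length) m + 1) 1).map
          (fun _ => ([] : List Int))).filter (fun g => decide ((g.length : Int) = m)) = [] := by
      apply List.filter_eq_nil_iff.mpr
      intro c hc
      rcases List.mem_map.mp hc with ⟨_, _, rfl⟩
      simp
      omega
    rw [hfilter]
    have hrange : PySem.List.pyRange (m - 1) ((PySem.List.sorted score (fun x => x) true).length : Int) m = [] := by
      unfold PySem.List.pyRange
      rw [if_neg (by omega), if_neg (by omega), if_neg (by omega)]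
      rfl
    rw [hrange]
    simp
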